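-- pv_equiv track=rewrite | github.com/pypi-data/pypi-mirror-325 | packages/formula_detection/formula_detection-0.4.0.tar.gz/formula_detection-0.4.0/formula_detection/normalisation/rewrite_historic_dutch.py | replace_ey
-- ===== SOURCE A (Python) =====
-- def replace_ey(word: str) -> str:
--     if word.startswith('Ey'):
--         word = 'Ei' + word[2:]
--     parts = word.split('ey')
--     rewrite_word = ''
--     exceptions = {"Hoey", "Bey", "Dey", "Peyrou", "Beyer", "Orkney"}
--     if word in exceptions:
--         return word
--     for pi, curr_part in enumerate(parts[:-1]):
--         rewrite_word += curr_part
--         if len(parts) > pi + 1 and len(parts[pi + 1]) > 0: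
--             next_part = parts[pi + 1]
--             if len(next_part) >= 2 and next_part[:2] in {'ck'}:
--                 if len(curr_part) >= 1 and curr_part[-1] in {'t'}:
--                     rewrite_word += 'e'
--                 else:
--                     rewrite_word += 'ei'
--             elif len(curr_part) >= 1 and curr_part[-1:] in {'l', 'o'}:
--                 rewrite_word += 'ei'
--             elif len(next_part) > 0 and next_part[0] in {'c', 'd', 'g', 'k', 'l', 'm', 'n', 's', 't', 'z'}:
--                 rewrite_word += 'ei'
--             else:
--                 rewrite_word += 'ey'
--         else:
--             rewrite_word += 'ei'
--     rewrite_word += parts[-1]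
--     return rewrite_word
-- ===== SOURCE B (Python) =====
-- def replace_ey(word: str) -> str:
--     if word.startswith('Ey'):
--         word = 'Ei' + word[2:]
--     if word in {"Hoey", "Bey", "Dey", "Peyrou", "Beyer", "Orkney"}:
--         return word
--     out = []
--     prev = ''   # last character of the current between-'ey' segment ('' if empty)
--     i = 0
--     n = len(word)
--     while i < n:
--         if word[i] == 'e' and i + 1 < n and word[i + 1] == 'y':
--             two = word[i + 2:i + 4]   # the (at most) two characters after the match
--             if two == '' or two == 'ey':
--                 rep = 'ei'
--             elif two == 'ck':
--                 rep = 'e' if prev == 't' else 'ei'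
--             elif prev in ('l', 'o'):
--                 rep = 'ei'
--             elif two[0] in 'cdgklmnstz':
--                 rep = 'ei'
--             else:
--                 rep = 'ey'
--             out.append(rep)
--             prev = ''
--             i += 2
--         else:
--             out.append(word[i])
--             prev = word[i]
--             i += 1
--     return ''.join(out)
-- ===== Notes on version B (the rewrite author's own statement) =====
-- stated objective: alternative
-- what changed: B replaces A's split-on-'ey'-then-fold-over-parts with a single recursive left-to-right character scan that carries only the last character of the current segment as context, deciding each 'ey' locally from the next one or two characters.
import Mathlib
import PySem

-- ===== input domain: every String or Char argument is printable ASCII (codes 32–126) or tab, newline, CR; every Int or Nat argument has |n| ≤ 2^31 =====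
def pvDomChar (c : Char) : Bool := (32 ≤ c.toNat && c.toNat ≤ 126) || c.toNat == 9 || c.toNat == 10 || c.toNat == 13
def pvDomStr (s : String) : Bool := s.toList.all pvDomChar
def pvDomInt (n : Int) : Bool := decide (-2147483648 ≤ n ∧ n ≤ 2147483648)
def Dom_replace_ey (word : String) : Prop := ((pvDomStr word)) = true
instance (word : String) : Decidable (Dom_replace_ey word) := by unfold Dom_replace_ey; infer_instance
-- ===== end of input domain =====

-- B replaces A's split-on-'ey'-then-fold-over-parts with a single recursive character
-- scan carrying only the last character of the current segment; same return value.

-- ===== PORT A =====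
-- the inner if/elif chain of A's loop body, on (curr_part, next_part)
def ruleInnerA (curr next : List Char) : List Char :=
  if 2 ≤ next.length ∧ PySem.Chars.slice next none (some 2) = ['c', 'k'] then
    (if 1 ≤ curr.length ∧ PySem.List.pyGetD curr (-1) ' ' = 't' then ['e'] else ['e', 'i'])
  else if 1 ≤ curr.length ∧
      (PySem.Chars.slice curr (some (-1)) none = ['l'] ∨
       PySem.Chars.slice curr (some (-1)) none = ['o']) then ['e', 'i']
  else if 0 < next.length ∧
      PySem.List.pyGetD next 0 ' ' ∈ ['c', 'd', 'g', 'k', 'l', 'm', 'n', 's', 't', 'z'] then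
    ['e', 'i']
  else ['e', 'y']

-- one iteration of A's `for pi, curr_part in enumerate(parts[:-1])` loop
def bodyA (parts : List (List Char)) (rw : List Char) (pc : Int × List Char) : List Char :=
  let rw := rw ++ pc.2
  if (parts.length : Int) > pc.1 + 1 ∧ 0 < (PySem.List.pyGetD parts (pc.1 + 1) []).length then
    rw ++ ruleInnerA pc.2 (PySem.List.pyGetD parts (pc.1 + 1) [])
  else rw ++ ['e', 'i']

def coreA (w0 : List Char) : List Char :=
  let word := if PySem.Chars.startswith w0 ['E', 'y'] then
      ['E', 'i'] ++ PySem.Chars.slice w0 (some 2) none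
    else w0
  let parts := PySem.Chars.splitOn word ['e', 'y']
  if word ∈ ["Hoey".toList, "Bey".toList, "Dey".toList, "Peyrou".toList,
             "Beyer".toList, "Orkney".toList] then word
  else
    (PySem.List.enumerate (PySem.List.slice parts none (some (-1))) 0).foldl (bodyA parts) []
      ++ PySem.List.pyGetD parts (-1) []

def replace_ey (word : String) : String := String.ofList (coreA word.toList)

-- ===== PORT B =====
-- the replacement for one found 'ey': prev is the last char of the current segment
-- ('' in Python ⇒ []), two is word[i+2:i+4], the ≤2 characters after the match
def repB2 (prev two : List Char) : List Char :=
  if two = [] ∨ two = ['e', 'y'] then ['e', 'i']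
  else if two = ['c', 'k'] then (if prev = ['t'] then ['e'] else ['e', 'i'])
  else if prev = ['l'] ∨ prev = ['o'] then ['e', 'i']
  else if two.headD ' ' ∈ ['c', 'd', 'g', 'k', 'l', 'm', 'n', 's', 't', 'z'] then ['e', 'i']
  else ['e', 'y']

-- B's while loop over the word; the remaining suffix word[i:] is the first argument,
-- out/prev are the loop's accumulators; word[i+2:i+4] is the take-2 of the suffix
def scanGo : List Char → List Char → List Char → List Char
  | 'e' :: 'y' :: rest, prev, out => scanGo rest [] (out ++ repB2 prev (rest.take 2))
  | [], _, out => out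
  | c :: rest, _, out => scanGo rest [c] (out ++ [c])

def coreB (w0 : List Char) : List Char :=
  let word := if PySem.Chars.startswith w0 ['E', 'y'] then
      ['E', 'i'] ++ PySem.Chars.slice w0 (some 2) none
    else w0
  if word ∈ ["Hoey".toList, "Bey".toList, "Dey".toList, "Peyrou".toList,
             "Beyer".toList, "Orkney".toList] then word
  else scanGo word [] []

def replace_ey_alt (word : String) : String := String.ofList (coreB word.toList)

-- ===== PRECONDITION & SPEC =====
def Spec_replace_ey (word : String) (out : String) : Prop := out = replace_ey_alt word
instance (word : String) (out : String) : Decidable (Spec_replace_ey word out) := by unfold Spec_replace_ey; infer_instance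

-- ===== CLAIM (what is proved, stated in full; the proofs are below) =====
def Claim_equal_replace_ey : Prop := ∀ (word : String), Dom_replace_ey word → Spec_replace_ey word (replace_ey word)

-- ===== LEMMAS AND PROOFS =====

-- non-accumulator forms of B's loop, used by the proofs
def repB (prev rest : List Char) : List Char :=
  if rest = [] ∨ PySem.Chars.slice rest none (some 2) = ['e', 'y'] then ['e', 'i']
  else if PySem.Chars.slice rest none (some 2) = ['c', 'k'] then
    (if prev = ['t'] then ['e'] else ['e', 'i'])
  else if prev = ['l'] ∨ prev = ['o'] then ['e', 'i']
  else if PySem.List.pyGetD rest 0 ' ' ∈ ['c', 'd', 'g', 'k', 'l', 'm', 'n', 's', 't', 'z'] then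
    ['e', 'i']
  else ['e', 'y']

def scanB : List Char → List Char → List Char
  | 'e' :: 'y' :: rest, prev => repB prev rest ++ scanB rest []
  | [], _ => []
  | c :: rest, _ => c :: scanB rest [c]

-- clean structural form of word.split('ey')
def msplitEy : List Char → List (List Char)
  | 'e' :: 'y' :: rest => [] :: msplitEy rest
  | c :: rest =>
    match msplitEy rest with
    | p :: ps => (c :: p) :: ps
    | [] => [[c]]
  | [] => [[]]

lemma msplitEy_ne_nil (l : List Char) : msplitEy l ≠ [] := by
  rw [msplitEy.eq_def]; split
  · simp
  · split <;> simp
  · simp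

lemma msplitEy_cons_not_ey (c : Char) (rest : List Char)
    (h : ¬ (['e','y'].isPrefixOf (c :: rest) = true)) :
    msplitEy (c :: rest) = match msplitEy rest with
      | p :: ps => (c :: p) :: ps
      | [] => [[c]] := by
  rw [msplitEy.eq_def]
  split
  · rename_i r heq
    exfalso; apply h
    injection heq with h1 h2; subst h1; subst h2
    simp [List.isPrefixOf]
  · rename_i c' rest' _ heq
    injection heq with h1 h2; subst h1; subst h2; rfl
  · rename_i heq; exact absurd heq (by simp)

lemma go_succ_nil (fuel : Nat) (cur : List Char) (acc : List (List Char)) :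
    PySem.Chars.splitOn.go ['e','y'] (fuel+1) [] cur acc = (cur.reverse :: acc).reverse := by
  rw [PySem.Chars.splitOn.go.eq_def]

lemma go_succ_cons (fuel : Nat) (c : Char) (rest cur : List Char) (acc : List (List Char)) :
    PySem.Chars.splitOn.go ['e','y'] (fuel+1) (c :: rest) cur acc =
      if ['e','y'].isPrefixOf (c :: rest) then
        PySem.Chars.splitOn.go ['e','y'] fuel ((c :: rest).drop 2) [] (cur.reverse :: acc)
      else PySem.Chars.splitOn.go ['e','y'] fuel rest (c :: cur) acc := by
  rw [PySem.Chars.splitOn.go.eq_def]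
  rfl

lemma go_eq_msplitEy (fuel : Nat) (l cur : List Char) (acc : List (List Char))
    (h : l.length < fuel) :
    PySem.Chars.splitOn.go ['e', 'y'] fuel l cur acc =
      acc.reverse ++ (match msplitEy l with
        | p :: ps => (cur.reverse ++ p) :: ps
        | [] => [cur.reverse]) := by
  induction fuel generalizing l cur acc with
  | zero => omega
  | succ fuel ih =>
    match l with
    | [] => rw [go_succ_nil]; simp [msplitEy]
    | c :: rest =>
      rw [go_succ_cons]
      by_cases hp : ['e','y'].isPrefixOf (c :: rest) = true
      · simp only [hp, if_true]
        obtain ⟨r, hr⟩ : ∃ r, c :: rest = 'e' :: 'y' :: r := by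
          cases rest with
          | nil => simp [List.isPrefixOf] at hp
          | cons d r => simp [List.isPrefixOf] at hp; exact ⟨r, by simp [← hp.1, ← hp.2]⟩
        injection hr with h1 h2; subst h1; subst h2
        simp only [List.length_cons] at h
        rw [ih _ _ _ (by simp; omega)]
        have hne := msplitEy_ne_nil r
        rw [msplitEy]
        cases hm : msplitEy r with
        | nil => exact absurd hm hne
        | cons p ps => simp [hm]
      · simp only [hp]
        rw [ih rest (c :: cur) acc (by simp at h ⊢; omega)]
        rw [msplitEy_cons_not_ey c rest hp]
        have hne := msplitEy_ne_nil rest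
        cases hm : msplitEy rest with
        | nil => exact absurd hm hne
        | cons p ps => simp

lemma splitOn_eq_msplitEy (l : List Char) :
    PySem.Chars.splitOn l ['e', 'y'] = msplitEy l := by
  rw [PySem.Chars.splitOn]
  rw [go_eq_msplitEy _ _ _ _ (by omega)]
  have hne := msplitEy_ne_nil l
  cases hm : msplitEy l with
  | nil => exact absurd hm hne
  | cons p ps => simp

-- pairwise glue form of A's loop
def glueA : List (List Char) → List Char
  | [p] => p
  | p :: q :: rest =>
    p ++ (if 0 < q.length then ruleInnerA p q else ['e', 'i']) ++ glueA (q :: rest)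
  | [] => []

-- last character of the current segment, as B tracks it
def last1 (l : List Char) : List Char := (l.getLast?).elim [] (fun c => [c])

def consHd (ctx : List Char) : List (List Char) → List (List Char)
  | p :: ps => (ctx ++ p) :: ps
  | [] => [ctx]

lemma foldA_eq_glueA (parts pref : List (List Char)) (acc : List Char)
    (hne : parts ≠ []) :
    (PySem.List.enumerate parts.dropLast (pref.length : Int)).foldl
        (bodyA (pref ++ parts)) acc ++ (pref ++ parts).getLastD [] =
      acc ++ glueA parts := by
  induction parts generalizing pref acc with
  | nil => exact absurd rfl hne
  | cons p tl ih =>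
    cases tl with
    | nil =>
      simp [glueA]
    | cons q rest =>
      have hlen : ((pref ++ p :: q :: rest).length : Int) > (pref.length : Int) + 1 := by
        simp
      have hget : PySem.List.pyGetD (pref ++ p :: q :: rest) ((pref.length : Int) + 1) [] = q := by
        have : ((pref.length : Int) + 1) = ((pref.length + 1 : Nat) : Int) := by push_cast; ring
        rw [this, PySem.List.pyGetD_natCast]
        rw [List.getD_eq_getElem?_getD, List.getElem?_append_right (by omega)]
        simp
      rw [show (p :: q :: rest).dropLast = p :: (q :: rest).dropLast from rfl]
      rw [PySem.List.enumerate_cons, List.foldl_cons]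
      have hbody : bodyA (pref ++ p :: q :: rest) acc ((pref.length : Int), p) =
          acc ++ p ++ (if 0 < q.length then ruleInnerA p q else ['e', 'i']) := by
        unfold bodyA
        simp only [hget, hlen]
        by_cases hq : 0 < q.length
        · simp [hq]
        · simp [hq]
      rw [hbody]
      have hsplit : pref ++ p :: q :: rest = (pref ++ [p]) ++ (q :: rest) := by simp
      have hlen1 : (pref.length : Int) + 1 = (((pref ++ [p]).length : Nat) : Int) := by
        simp
      rw [hlen1, show (pref ++ p :: q :: rest) = (pref ++ [p]) ++ (q :: rest) from hsplit]
      rw [ih (pref ++ [p]) (acc ++ p ++ (if 0 < q.length then ruleInnerA p q else ['e', 'i'])) (by simp)]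
      simp [glueA]

def hS (r : List Char) : List Char := (msplitEy r).headI

-- normal form of A's rule, on (last char of curr, next)
def ruleN (prev next : List Char) : List Char :=
  if next = [] then ['e', 'i']
  else if next.take 2 = ['c', 'k'] then (if prev = ['t'] then ['e'] else ['e', 'i'])
  else if prev = ['l'] ∨ prev = ['o'] then ['e', 'i']
  else if next.headD ' ' ∈ ['c', 'd', 'g', 'k', 'l', 'm', 'n', 's', 't', 'z'] then ['e', 'i']
  else ['e', 'y']

lemma last1_cons (a : Char) (t : List Char) :
    last1 (a :: t) = [(a :: t).getLast (by simp)] := by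
  simp [last1, List.getLast?_eq_some_getLast (l := a :: t) (h := by simp)]

lemma last1_eq_t (ctx : List Char) (c : Char) :
    (1 ≤ ctx.length ∧ PySem.List.pyGetD ctx (-1) ' ' = c) ↔ last1 ctx = [c] := by
  cases ctx with
  | nil => simp [last1]
  | cons a t =>
    have hne : a :: t ≠ [] := by simp
    rw [PySem.List.pyGetD_neg_one (a :: t) ' ' hne, last1_cons]
    simp

lemma slice_last_eq (ctx : List Char) (c : Char) :
    (1 ≤ ctx.length ∧ PySem.Chars.slice ctx (some (-1)) none = [c]) ↔ last1 ctx = [c] := by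
  cases ctx with
  | nil => simp [last1, pysem]
  | cons a t =>
    have hne : a :: t ≠ [] := by simp
    have hs : PySem.Chars.slice (a :: t) (some (-1)) none = [(a :: t).getLast hne] := by
      simp [pysem]; exact List.drop_length_sub_one hne
    rw [hs, last1_cons]
    simp

lemma ruleInnerA_eq (ctx next : List Char) :
    (if 0 < next.length then ruleInnerA ctx next else ['e', 'i']) = ruleN (last1 ctx) next := by
  cases next with
  | nil => simp [ruleN]
  | cons n0 nt =>
    simp only [List.length_cons, Nat.zero_lt_succ, if_true]
    unfold ruleInnerA ruleN
    have h2 : PySem.Chars.slice (n0 :: nt) none (some 2) = (n0 :: nt).take 2 := by simp [pysem]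
    have hck : (2 ≤ nt.length + 1 ∧ (n0 :: nt).take 2 = ['c', 'k']) ↔
        (n0 :: nt).take 2 = ['c', 'k'] := by
      constructor
      · exact fun h => h.2
      · intro h
        refine ⟨?_, h⟩
        have := congrArg List.length h
        simp [List.length_take, List.length_cons] at this
        omega
    simp only [h2, hck, and_or_left, slice_last_eq, last1_eq_t, PySem.List.pyGetD_zero_cons,
      List.headD_cons, List.length_cons, Nat.zero_lt_succ, true_and, reduceCtorEq, if_false]
    split_ifs <;> rfl

lemma repB_eq (prev rest : List Char) :
    repB prev rest =
      if rest = [] ∨ rest.take 2 = ['e', 'y'] then ['e', 'i']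
      else if rest.take 2 = ['c', 'k'] then (if prev = ['t'] then ['e'] else ['e', 'i'])
      else if prev = ['l'] ∨ prev = ['o'] then ['e', 'i']
      else if rest.headD ' ' ∈ ['c', 'd', 'g', 'k', 'l', 'm', 'n', 's', 't', 'z'] then ['e', 'i']
      else ['e', 'y'] := by
  unfold repB
  have h2 : PySem.Chars.slice rest none (some 2) = rest.take 2 := by simp [pysem]
  have h0 : PySem.List.pyGetD rest 0 ' ' = rest.headD ' ' := by
    rw [PySem.List.pyGetD_zero]
    cases rest <;> simp
  rw [h2, h0]

lemma hS_nil : hS [] = [] := rfl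

lemma hS_ey (r : List Char) : hS ('e' :: 'y' :: r) = [] := rfl

lemma hS_cons (c : Char) (r : List Char) (h : ¬ (['e','y'].isPrefixOf (c :: r) = true)) :
    hS (c :: r) = c :: hS r := by
  unfold hS
  rw [msplitEy_cons_not_ey c r h]
  have hne := msplitEy_ne_nil r
  cases hm : msplitEy r with
  | nil => exact absurd hm hne
  | cons p ps => simp

lemma take1_hS (r : List Char) (k : Char) (hk : k ≠ 'e') :
    (hS r).take 1 = [k] ↔ r.take 1 = [k] := by
  cases r with
  | nil => simp [hS_nil]
  | cons c t =>
    by_cases hp : ['e','y'].isPrefixOf (c :: t) = true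
    · obtain ⟨r', hr⟩ : ∃ r', c :: t = 'e' :: 'y' :: r' := by
        cases t with
        | nil => simp [List.isPrefixOf] at hp
        | cons d r' => simp [List.isPrefixOf] at hp; exact ⟨r', by simp [← hp.1, ← hp.2]⟩
      injection hr with h1 h2; subst h1; subst h2
      rw [hS_ey]
      simp [hk.symm]
    · rw [hS_cons c t hp]
      simp

lemma rule_core (prev r : List Char) :
    ruleN prev (hS r) =
      if r = [] ∨ r.take 2 = ['e', 'y'] then ['e', 'i']
      else if r.take 2 = ['c', 'k'] then (if prev = ['t'] then ['e'] else ['e', 'i'])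
      else if prev = ['l'] ∨ prev = ['o'] then ['e', 'i']
      else if r.headD ' ' ∈ ['c', 'd', 'g', 'k', 'l', 'm', 'n', 's', 't', 'z'] then ['e', 'i']
      else ['e', 'y'] := by
  cases r with
  | nil => simp [ruleN, hS_nil]
  | cons c t =>
    by_cases hp : ['e','y'].isPrefixOf (c :: t) = true
    · obtain ⟨r', hr⟩ : ∃ r', c :: t = 'e' :: 'y' :: r' := by
        cases t with
        | nil => simp [List.isPrefixOf] at hp
        | cons d r' => simp [List.isPrefixOf] at hp; exact ⟨r', by simp [← hp.1, ← hp.2]⟩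
      injection hr with h1 h2; subst h1; subst h2
      rw [hS_ey]
      simp [ruleN, List.take_succ_cons]
    · rw [hS_cons c t hp]
      unfold ruleN
      have hckiff : ((c :: hS t).take 2 = ['c', 'k']) ↔ ((c :: t).take 2 = ['c', 'k']) := by
        simp only [List.take_succ_cons, List.cons.injEq]
        exact and_congr Iff.rfl (take1_hS t 'k' (by decide))
      have heyfalse : ¬(c :: t = [] ∨ (c :: t).take 2 = ['e', 'y']) := by
        rintro (h | h)
        · simp at h
        · simp only [List.take_succ_cons, List.cons.injEq] at h
          obtain ⟨rfl, h2⟩ := h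
          apply hp
          cases t with
          | nil => simp at h2
          | cons d t' =>
            simp only [List.take_succ_cons, List.take_zero, List.cons.injEq] at h2
            obtain ⟨rfl, -⟩ := h2
            simp [List.isPrefixOf]
      rw [if_neg heyfalse, if_neg (by simp), if_congr hckiff rfl rfl]
      simp only [List.headD_cons]
      split_ifs <;> rfl

lemma scanB_cons_not_ey (c : Char) (r : List Char) (prev : List Char)
    (h : ¬ (['e','y'].isPrefixOf (c :: r) = true)) :
    scanB (c :: r) prev = c :: scanB r [c] := by
  rw [scanB.eq_def]
  split
  · rename_i r' heq
    exfalso; apply h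
    injection heq with h1 h2; subst h1; subst h2
    simp [List.isPrefixOf]
  · rename_i heq; exact absurd heq (by simp)
  · rename_i c' r' _ _ heq
    injection heq with h1 h2; subst h1; subst h2; rfl

lemma last1_snoc (l : List Char) (c : Char) : last1 (l ++ [c]) = [c] := by
  simp [last1]

lemma glueA_eq_scanB (n : Nat) (cs ctx : List Char) (hn : cs.length ≤ n) :
    glueA (consHd ctx (msplitEy cs)) = ctx ++ scanB cs (last1 ctx) := by
  induction n generalizing cs ctx with
  | zero =>
    have : cs = [] := by cases cs <;> simp_all
    subst this
    simp [msplitEy, consHd, glueA, scanB]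
  | succ n ih =>
    cases cs with
    | nil => simp [msplitEy, consHd, glueA, scanB]
    | cons c t =>
      by_cases hp : ['e','y'].isPrefixOf (c :: t) = true
      · obtain ⟨r, hr⟩ : ∃ r, c :: t = 'e' :: 'y' :: r := by
          cases t with
          | nil => simp [List.isPrefixOf] at hp
          | cons d r => simp [List.isPrefixOf] at hp; exact ⟨r, by simp [← hp.1, ← hp.2]⟩
        injection hr with h1 h2; subst h1; subst h2
        rw [show msplitEy ('e' :: 'y' :: r) = [] :: msplitEy r from rfl]
        have hne := msplitEy_ne_nil r
        cases hm : msplitEy r with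
        | nil => exact absurd hm hne
        | cons p ps =>
          have hcons : consHd ctx ([] :: p :: ps) = ctx :: p :: ps := by simp [consHd]
          rw [hcons]
          have hglue : glueA (ctx :: p :: ps) =
              ctx ++ (if 0 < p.length then ruleInnerA ctx p else ['e', 'i']) ++ glueA (p :: ps) := by
            rfl
          rw [hglue]
          have hhS : hS r = p := by simp [hS, hm]
          have hrule : (if 0 < p.length then ruleInnerA ctx p else ['e', 'i']) =
              repB (last1 ctx) r := by
            rw [← hhS, ruleInnerA_eq, rule_core, ← repB_eq]
          have hrest : glueA (p :: ps) = scanB r [] := by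
            have := ih r [] (by simp at hn; omega)
            rw [hm] at this
            simpa [consHd, last1] using this
          rw [hrule, hrest]
          rw [show scanB ('e' :: 'y' :: r) (last1 ctx) = repB (last1 ctx) r ++ scanB r [] from rfl]
          simp
      · rw [msplitEy_cons_not_ey c t hp]
        have hne := msplitEy_ne_nil t
        cases hm : msplitEy t with
        | nil => exact absurd hm hne
        | cons p ps =>
          have hcons : consHd ctx ((c :: p) :: ps) = consHd (ctx ++ [c]) (p :: ps) := by
            simp [consHd]
          rw [hcons, ← hm]
          rw [ih t (ctx ++ [c]) (by simp at hn; omega)]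
          rw [last1_snoc, scanB_cons_not_ey c t (last1 ctx) hp]
          simp


lemma repB2_take (prev rest : List Char) : repB2 prev (rest.take 2) = repB prev rest := by
  rw [repB_eq]
  cases rest with
  | nil => simp [repB2]
  | cons c t =>
    unfold repB2
    simp only [List.take_succ_cons, List.headD_cons, reduceCtorEq, false_or,
      List.cons.injEq]
    rfl

lemma scanGo_eq (s prev out : List Char) : scanGo s prev out = out ++ scanB s prev := by
  induction s, prev using scanB.induct generalizing out with
  | case1 rest prev ih =>
    rw [scanGo, show scanB ('e' :: 'y' :: rest) prev = repB prev rest ++ scanB rest [] from rfl,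
      ih, repB2_take]
    simp
  | case2 prev => rw [scanGo, show scanB [] prev = [] from rfl]; simp
  | case3 c rest prev h ih =>
    have hp : ¬ (['e','y'].isPrefixOf (c :: rest) = true) := by
      intro hpre
      cases rest with
      | nil => simp [List.isPrefixOf] at hpre
      | cons d r =>
        simp [List.isPrefixOf] at hpre
        exact h r hpre.1.symm (by simp [← hpre.2])
    rw [scanB_cons_not_ey c rest prev hp]
    rw [scanGo.eq_def]
    split
    · rename_i r' heq
      exfalso; apply hp
      injection heq with h1 h2; subst h1; subst h2
      simp [List.isPrefixOf]
    · rename_i heq; exact absurd heq (by simp)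
    · rename_i c' r' _ _ heq
      injection heq with h1 h2; subst h1; subst h2
      rw [ih]
      simp

theorem coreA_eq_coreB (w0 : List Char) : coreA w0 = coreB w0 := by
  unfold coreA coreB
  set word := (if PySem.Chars.startswith w0 ['E', 'y'] then
      ['E', 'i'] ++ PySem.Chars.slice w0 (some 2) none else w0) with hw
  by_cases hex : word ∈ ["Hoey".toList, "Bey".toList, "Dey".toList, "Peyrou".toList,
      "Beyer".toList, "Orkney".toList]
  · simp only [hex, if_true]
  · simp only [hex, if_false]
    rw [splitOn_eq_msplitEy]
    have hne := msplitEy_ne_nil word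
    have hslice : PySem.List.slice (msplitEy word) none (some (-1)) = (msplitEy word).dropLast :=
      PySem.List.slice_to_neg_one _
    have hlast : PySem.List.pyGetD (msplitEy word) (-1) [] = (msplitEy word).getLastD [] := by
      rw [PySem.List.pyGetD_neg_one _ _ hne, List.getLastD_eq_getLast?,
        List.getLast?_eq_some_getLast (h := hne)]
      rfl
    rw [hslice, hlast]
    have hfold := foldA_eq_glueA (msplitEy word) [] [] hne
    simp only [List.nil_append, List.length_nil, Nat.cast_zero] at hfold
    rw [hfold]
    have hmain := glueA_eq_scanB word.length word [] le_rfl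
    have hcons : consHd [] (msplitEy word) = msplitEy word := by
      cases hm : msplitEy word with
      | nil => exact absurd hm hne
      | cons p ps => simp [consHd]
    rw [hcons] at hmain
    rw [scanGo_eq]
    simpa [last1] using hmain

-- ===== VERDICT (by name: the statement is the Claim_ definition above) =====
theorem replace_ey_spec : Claim_equal_replace_ey := by
  intro word _
  unfold Spec_replace_ey replace_ey replace_ey_alt
  rw [coreA_eq_coreB]
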